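-- pv_equiv track=rewrite | github.com/anubissbe/knowledgehub | api/services/milestone_detector.py | _group_tasks_by_type
-- ===== SOURCE A (Python) =====
-- from typing import Dict, List, Optional, Set, Tuple, Any
--
-- def _group_tasks_by_type(tasks: List[Dict[str, Any]]) -> Dict[str, List[Dict[str, Any]]]:
--     """Group tasks by type or category"""
--
--     groups = {}
--
--     for task in tasks:
--         task_type = task.get('type', 'general')
--         title = task.get('title', '').lower()
--
--         # Categorize based on title keywords
--         if any(keyword in title for keyword in ['test', 'qa', 'quality']):
--             task_type = 'testing'
--         elif any(keyword in title for keyword in ['deploy', 'release', 'production']):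
--             task_type = 'deployment'
--         elif any(keyword in title for keyword in ['design', 'plan', 'requirement']):
--             task_type = 'planning'
--         elif any(keyword in title for keyword in ['develop', 'implement', 'code', 'build']):
--             task_type = 'development'
--         elif any(keyword in title for keyword in ['review', 'audit', 'check']):
--             task_type = 'review'
--
--         if task_type not in groups:
--             groups[task_type] = []
--         groups[task_type].append(task)
--
--     return groups
-- ===== SOURCE B (Python) =====
-- KEYWORD_TO_CATEGORY = [
--     ('test', 'testing'), ('qa', 'testing'), ('quality', 'testing'),
--     ('deploy', 'deployment'), ('release', 'deployment'), ('production', 'deployment'),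
--     ('design', 'planning'), ('plan', 'planning'), ('requirement', 'planning'),
--     ('develop', 'development'), ('implement', 'development'), ('code', 'development'),
--     ('build', 'development'),
--     ('review', 'review'), ('audit', 'review'), ('check', 'review'),
-- ]
--
--
-- def _classify(task):
--     """Category of one task: first matching keyword in the flat priority table,
--     else the task's own type, else 'general'."""
--     title = task.get('title', '').lower()
--     for kw, cat in KEYWORD_TO_CATEGORY:
--         if kw in title:
--             return cat
--     return task.get('type', 'general')
--
--
-- def _group_tasks_by_type(tasks):
--     """Group tasks by type or category, in staged passes: label every task,
--     dedup the labels in first-occurrence order, then collect each group."""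
--     labels = [_classify(t) for t in tasks]
--     order = list(dict.fromkeys(labels))
--     return {lab: [t for t in tasks if _classify(t) == lab] for lab in order}
-- ===== Notes on version B (the rewrite author's own statement) =====
-- stated objective: alternative
-- what changed: A makes one pass maintaining a dict accumulator with an inline if/elif keyword chain; B works in staged passes: it labels every task via a flat (keyword, category) priority table, dedups the labels in first-occurrence order with dict.fromkeys, and then builds each group by filtering the task list per label.
import Mathlib
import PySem

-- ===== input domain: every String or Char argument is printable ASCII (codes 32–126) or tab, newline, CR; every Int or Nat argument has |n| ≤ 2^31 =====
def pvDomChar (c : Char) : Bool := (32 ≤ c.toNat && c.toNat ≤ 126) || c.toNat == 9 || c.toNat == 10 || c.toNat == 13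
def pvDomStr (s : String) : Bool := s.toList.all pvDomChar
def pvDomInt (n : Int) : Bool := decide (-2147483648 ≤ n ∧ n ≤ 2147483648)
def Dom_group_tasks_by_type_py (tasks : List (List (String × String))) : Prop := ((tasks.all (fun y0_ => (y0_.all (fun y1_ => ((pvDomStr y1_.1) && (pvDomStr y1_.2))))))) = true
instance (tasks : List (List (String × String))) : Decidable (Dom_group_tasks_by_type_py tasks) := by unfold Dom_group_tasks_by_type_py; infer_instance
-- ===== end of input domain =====

-- B replaces A's single-pass dict accumulation (inline if/elif keyword chain) by staged
-- passes: label each task via a flat keyword→category table, dedup labels, filter per label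
-- (alternative decomposition; same results).


-- ===== PORT A =====
-- task.get(k, dflt) on the association-list representation of the Python dict (first match)
def pvGet (task : List (String × String)) (k dflt : String) : String :=
  match task.find? (fun p => p.1 == k) with
  | some p => p.2
  | none => dflt

def stepA (groups : PySem.Dict String (List (List (String × String))))
    (task : List (String × String)) : PySem.Dict String (List (List (String × String))) :=
  let task_type := pvGet task "type" "general"
  let title := PySem.Str.lower (pvGet task "title" "")
  let task_type :=
    if (["test", "qa", "quality"] : List String).any (fun kw => PySem.Str.isIn kw title) then "testing"
    else if (["deploy", "release", "production"] : List String).any (fun kw => PySem.Str.isIn kw title) then "deployment"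
    else if (["design", "plan", "requirement"] : List String).any (fun kw => PySem.Str.isIn kw title) then "planning"
    else if (["develop", "implement", "code", "build"] : List String).any (fun kw => PySem.Str.isIn kw title) then "development"
    else if (["review", "audit", "check"] : List String).any (fun kw => PySem.Str.isIn kw title) then "review"
    else task_type
  let groups := if groups.contains task_type then groups else groups.insert task_type []
  groups.insert task_type (groups.getD task_type [] ++ [task])

def group_tasks_by_type_py (tasks : List (List (String × String))) : List (String × List (List (String × String))) :=
  (tasks.foldl stepA PySem.Dict.empty).items

-- ===== PORT B =====
def KEYWORD_TO_CATEGORY : List (String × String) :=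
  [("test", "testing"), ("qa", "testing"), ("quality", "testing"),
   ("deploy", "deployment"), ("release", "deployment"), ("production", "deployment"),
   ("design", "planning"), ("plan", "planning"), ("requirement", "planning"),
   ("develop", "development"), ("implement", "development"), ("code", "development"),
   ("build", "development"),
   ("review", "review"), ("audit", "review"), ("check", "review")]

def pvClassify (task : List (String × String)) : String :=
  let title := PySem.Str.lower (pvGet task "title" "")
  match KEYWORD_TO_CATEGORY.find? (fun p => PySem.Str.isIn p.1 title) with
  | some p => p.2
  | none => pvGet task "type" "general"

def group_tasks_by_type_py_alt (tasks : List (List (String × String))) : List (String × List (List (String × String))) :=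
  let labels := tasks.map pvClassify
  let order := PySem.List.dedup labels
  order.map (fun lab => (lab, tasks.filter (fun t => pvClassify t == lab)))

-- ===== PRECONDITION & SPEC =====
def Spec_group_tasks_by_type_py (tasks : List (List (String × String))) (out : List (String × List (List (String × String)))) : Prop := out = group_tasks_by_type_py_alt tasks
instance (tasks : List (List (String × String))) (out : List (String × List (List (String × String)))) : Decidable (Spec_group_tasks_by_type_py tasks out) := by unfold Spec_group_tasks_by_type_py; infer_instance

-- ===== CLAIM (what is proved, stated in full; the proofs are below) =====
def Claim_equal_group_tasks_by_type_py : Prop := ∀ (tasks : List (List (String × String))), Dom_group_tasks_by_type_py tasks → Spec_group_tasks_by_type_py tasks (group_tasks_by_type_py tasks)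

-- ===== LEMMAS AND PROOFS =====

-- a segment of the flat table whose entries all carry category `cat` behaves like one any-test
theorem find?_flat_segment (kws : List String) (cat : String) (rest : List (String × String)) (title : String) :
    (((kws.map (fun kw => (kw, cat)) ++ rest).find? (fun p => PySem.Str.isIn p.1 title)).map (·.2))
    = if kws.any (fun kw => PySem.Str.isIn kw title) then some cat
      else ((rest.find? (fun p => PySem.Str.isIn p.1 title)).map (·.2)) := by
  induction kws with
  | nil => simp
  | cons k ks ih =>
    by_cases h : PySem.Str.isIn k title = true
    · simp only [List.map_cons, List.cons_append]
      rw [List.find?_cons_of_pos (p := fun q : String × String => PySem.Str.isIn q.1 title)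
        (a := (k, cat)) (l := List.map (fun kw => (kw, cat)) ks ++ rest) h]
      have hany : ((k :: ks).any fun kw => PySem.Str.isIn kw title) = true := by
        simp only [List.any_cons, h, Bool.true_or]
      rw [if_pos hany]
      rfl
    · simp only [List.map_cons, List.cons_append]
      rw [List.find?_cons_of_neg (p := fun q : String × String => PySem.Str.isIn q.1 title)
        (a := (k, cat)) (l := List.map (fun kw => (kw, cat)) ks ++ rest) (by simpa using h)]
      simp only [List.any_cons, h, Bool.false_or]
      rw [ih]

-- B's flat-table classification equals A's if/elif chain
theorem classify_eq_chain (task : List (String × String)) :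
    pvClassify task =
    (if (["test", "qa", "quality"] : List String).any (fun kw => PySem.Str.isIn kw (PySem.Str.lower (pvGet task "title" ""))) then "testing"
     else if (["deploy", "release", "production"] : List String).any (fun kw => PySem.Str.isIn kw (PySem.Str.lower (pvGet task "title" ""))) then "deployment"
     else if (["design", "plan", "requirement"] : List String).any (fun kw => PySem.Str.isIn kw (PySem.Str.lower (pvGet task "title" ""))) then "planning"
     else if (["develop", "implement", "code", "build"] : List String).any (fun kw => PySem.Str.isIn kw (PySem.Str.lower (pvGet task "title" ""))) then "development"
     else if (["review", "audit", "check"] : List String).any (fun kw => PySem.Str.isIn kw (PySem.Str.lower (pvGet task "title" ""))) then "review"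
     else pvGet task "type" "general") := by
  unfold pvClassify
  have hmatch : ∀ (o : Option (String × String)) (fb : String),
      (match o with | some p => p.2 | none => fb) = (o.map (·.2)).getD fb := by
    intro o fb; cases o <;> rfl
  rw [hmatch]
  generalize pvGet task "type" "general" = fb
  generalize PySem.Str.lower (pvGet task "title" "") = title
  have htab : KEYWORD_TO_CATEGORY =
      (["test", "qa", "quality"] : List String).map (fun kw => (kw, "testing")) ++
      ((["deploy", "release", "production"] : List String).map (fun kw => (kw, "deployment")) ++
      ((["design", "plan", "requirement"] : List String).map (fun kw => (kw, "planning")) ++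
      ((["develop", "implement", "code", "build"] : List String).map (fun kw => (kw, "development")) ++
      ((["review", "audit", "check"] : List String).map (fun kw => (kw, "review")) ++ ([] : List (String × String)))))) := rfl
  rw [htab, find?_flat_segment, find?_flat_segment, find?_flat_segment, find?_flat_segment,
    find?_flat_segment]
  simp only [List.find?_nil, Option.map_none]
  split_ifs <;> rfl

-- A's loop body is exactly a dict.modify keyed by the classification
theorem stepA_eq_modify (g : PySem.Dict String (List (List (String × String))))
    (t : List (String × String)) :
    stepA g t = g.modify (pvClassify t) [] (· ++ [t]) := by
  rw [classify_eq_chain]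
  simp only [stepA, PySem.Dict.modify]
  generalize (if (["test", "qa", "quality"] : List String).any (fun kw => PySem.Str.isIn kw (PySem.Str.lower (pvGet t "title" ""))) then "testing"
     else if (["deploy", "release", "production"] : List String).any (fun kw => PySem.Str.isIn kw (PySem.Str.lower (pvGet t "title" ""))) then "deployment"
     else if (["design", "plan", "requirement"] : List String).any (fun kw => PySem.Str.isIn kw (PySem.Str.lower (pvGet t "title" ""))) then "planning"
     else if (["develop", "implement", "code", "build"] : List String).any (fun kw => PySem.Str.isIn kw (PySem.Str.lower (pvGet t "title" ""))) then "development"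
     else if (["review", "audit", "check"] : List String).any (fun kw => PySem.Str.isIn kw (PySem.Str.lower (pvGet t "title" ""))) then "review"
     else pvGet t "type" "general") = l
  by_cases hc : g.contains l = true
  · simp only [hc, if_true]
  · simp only [hc, Bool.false_eq_true, if_false]
    rw [PySem.Dict.insert_insert_self, PySem.Dict.getD_insert_self,
      PySem.Dict.getD_of_not_contains g [] (by simpa using hc)]

-- ===== VERDICT (by name: the statement is the Claim_ definition above) =====
theorem group_tasks_by_type_py_spec : Claim_equal_group_tasks_by_type_py := by
  intro tasks _
  unfold Spec_group_tasks_by_type_py group_tasks_by_type_py group_tasks_by_type_py_alt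
  have hstep : stepA = fun g t => g.modify (pvClassify t) [] (· ++ [t]) := by
    funext g t; exact stepA_eq_modify g t
  rw [hstep]
  have hnd : (tasks.foldl (fun g t => g.modify (pvClassify t) [] (· ++ [t])) PySem.Dict.empty).keys.Nodup :=
    PySem.Dict.nodup_keys_foldl_modify_key tasks pvClassify [] _ PySem.Dict.empty PySem.Dict.nodup_keys_empty
  rw [PySem.Dict.items_eq_map_keys _ hnd []]
  have hkeys : (tasks.foldl (fun g t => g.modify (pvClassify t) [] (· ++ [t])) PySem.Dict.empty).keys
      = PySem.List.dedup (tasks.map pvClassify) := by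
    rw [PySem.Dict.keys_foldl_modify_key]
    simp [PySem.Set.update_nil_left, PySem.Dict.keys_empty]
  rw [hkeys]
  apply List.map_congr_left
  intro lab _
  have hfold : (tasks.map (fun t => (pvClassify t, t))).foldl
      (fun g p => g.modify p.1 [] (· ++ [p.2])) PySem.Dict.empty
      = tasks.foldl (fun g t => g.modify (pvClassify t) [] (· ++ [t])) PySem.Dict.empty := by
    rw [List.foldl_map]
  rw [← hfold]
  rw [PySem.Dict.getD_foldl_modify_append]
  simp [List.filter_map, Function.comp_def, List.map_id']
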